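-- pv_equiv track=rewrite | github.com/dislovemartin/ACGS | scripts/add_comprehensive_type_annotations.py | generate_import_statements
-- ===== SOURCE A (Python) =====
-- from typing import Dict, List, Set, Tuple, Optional, Any, Union
--
-- def generate_import_statements(type_annotations: Set[str]) -> List[str]:
--     """Generate necessary import statements for type annotations."""
--     imports = []
--
--     # Standard typing imports
--     typing_imports = []
--     for annotation in type_annotations:
--         if annotation in ['Dict', 'List', 'Optional', 'Union', 'Any', 'Tuple']:
--             typing_imports.append(annotation)
--
--     if typing_imports:
--         imports.append(f"from typing import {', '.join(sorted(typing_imports))}")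
--
--     # FastAPI imports
--     fastapi_imports = []
--     for annotation in type_annotations:
--         if annotation in ['Request', 'Response', 'HTTPException']:
--             fastapi_imports.append(annotation)
--
--     if fastapi_imports:
--         imports.append(f"from fastapi import {', '.join(sorted(fastapi_imports))}")
--
--     # SQLAlchemy imports
--     if 'AsyncSession' in type_annotations:
--         imports.append("from sqlalchemy.ext.asyncio import AsyncSession")
--
--     return imports
-- ===== SOURCE B (Python) =====
-- # B: one data-driven pass — map each annotation to its module with a lookup table,
-- # group into per-module buckets, then emit one line per module in fixed order.
-- _MODULE_OF = {
--     'Dict': 'typing', 'List': 'typing', 'Optional': 'typing',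
--     'Union': 'typing', 'Any': 'typing', 'Tuple': 'typing',
--     'Request': 'fastapi', 'Response': 'fastapi', 'HTTPException': 'fastapi',
--     'AsyncSession': 'sqlalchemy.ext.asyncio',
-- }
-- _MODULE_ORDER = ['typing', 'fastapi', 'sqlalchemy.ext.asyncio']
--
-- def generate_import_statements(type_annotations):
--     buckets = {}
--     for a in type_annotations:
--         m = _MODULE_OF.get(a)
--         if m is not None:
--             buckets.setdefault(m, []).append(a)
--     lines = []
--     for m in _MODULE_ORDER:
--         g = buckets.get(m, [])
--         if g:
--             lines.append(f"from {m} import {', '.join(sorted(g))}")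
--     return lines
-- ===== Notes on version B (the rewrite author's own statement) =====
-- stated objective: idiomatic
-- what changed: Replaced A's three hardcoded category scans with a single pass that groups annotations into per-module buckets via an annotation-to-module lookup table, then emits one line per module in fixed order.
import Mathlib
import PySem

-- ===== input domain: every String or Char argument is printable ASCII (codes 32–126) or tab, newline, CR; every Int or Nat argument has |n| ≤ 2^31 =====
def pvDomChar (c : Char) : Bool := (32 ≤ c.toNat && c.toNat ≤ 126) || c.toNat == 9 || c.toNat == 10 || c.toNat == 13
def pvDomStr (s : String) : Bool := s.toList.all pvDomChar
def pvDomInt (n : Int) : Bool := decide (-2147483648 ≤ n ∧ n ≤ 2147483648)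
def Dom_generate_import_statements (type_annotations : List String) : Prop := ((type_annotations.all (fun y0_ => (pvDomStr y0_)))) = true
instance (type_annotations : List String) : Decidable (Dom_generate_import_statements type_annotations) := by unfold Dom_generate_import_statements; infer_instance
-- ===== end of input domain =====

-- B groups annotations into per-module buckets in one table-driven pass instead of A's three
-- hardcoded category blocks; same return value, idiomatic rewrite (no speed claim).

-- ===== PORT A =====
def generate_import_statements (type_annotations : List String) : List String :=
  let imports : List String := []
  let typing_imports := type_annotations.foldl
    (fun acc a => if a ∈ (["Dict", "List", "Optional", "Union", "Any", "Tuple"] : List String)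
      then acc ++ [a] else acc) []
  let imports := if typing_imports ≠ [] then
      imports ++ ["from typing import " ++ PySem.Str.join ", " (PySem.List.sorted typing_imports (fun x => x) false)]
    else imports
  let fastapi_imports := type_annotations.foldl
    (fun acc a => if a ∈ (["Request", "Response", "HTTPException"] : List String)
      then acc ++ [a] else acc) []
  let imports := if fastapi_imports ≠ [] then
      imports ++ ["from fastapi import " ++ PySem.Str.join ", " (PySem.List.sorted fastapi_imports (fun x => x) false)]
    else imports
  let imports := if "AsyncSession" ∈ type_annotations then
      imports ++ ["from sqlalchemy.ext.asyncio import AsyncSession"]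
    else imports
  imports

-- ===== PORT B =====
def pvModuleOf : PySem.Dict String String := PySem.Dict.mk
  [("Dict", "typing"), ("List", "typing"), ("Optional", "typing"),
   ("Union", "typing"), ("Any", "typing"), ("Tuple", "typing"),
   ("Request", "fastapi"), ("Response", "fastapi"), ("HTTPException", "fastapi"),
   ("AsyncSession", "sqlalchemy.ext.asyncio")]

def pvModuleOrder : List String := ["typing", "fastapi", "sqlalchemy.ext.asyncio"]

def generate_import_statements_alt (type_annotations : List String) : List String :=
  let buckets := type_annotations.foldl
    (fun d a => match pvModuleOf.get? a with
      | some m => d.modify m [] (· ++ [a])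
      | none => d) PySem.Dict.empty
  pvModuleOrder.foldl (fun lines m =>
    let g := buckets.getD m []
    if g ≠ [] then
      lines ++ [("from " ++ m ++ " import ") ++ PySem.Str.join ", " (PySem.List.sorted g (fun x => x) false)]
    else lines) []

-- ===== PRECONDITION & SPEC =====
-- The Python argument is a set, so its List representation holds distinct elements.
def Pre_generate_import_statements (type_annotations : List String) : Prop :=
  type_annotations.Nodup
instance (type_annotations : List String) : Decidable (Pre_generate_import_statements type_annotations) := by unfold Pre_generate_import_statements; infer_instance

def pvWitness_generate_import_statements : List String :=
  ["List", "Request", "AsyncSession", "Dict", "foo"]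

def Spec_generate_import_statements (type_annotations : List String) (out : List String) : Prop := out = generate_import_statements_alt type_annotations
instance (type_annotations : List String) (out : List String) : Decidable (Spec_generate_import_statements type_annotations out) := by unfold Spec_generate_import_statements; infer_instance

-- ===== CLAIM (what is proved, stated in full; the proofs are below) =====
def Claim_equal_generate_import_statements : Prop := ∀ (type_annotations : List String), Dom_generate_import_statements type_annotations → Pre_generate_import_statements type_annotations → Spec_generate_import_statements type_annotations (generate_import_statements type_annotations)

-- ===== LEMMAS AND PROOFS =====

-- the bucket fold, named for the proofs
def pvBFold (xs : List String) (d : PySem.Dict String (List String)) : PySem.Dict String (List String) :=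
  xs.foldl (fun d a => match pvModuleOf.get? a with
    | some m => d.modify m [] (· ++ [a])
    | none => d) d

theorem pvGet?_mk_nil (x : String) : (PySem.Dict.mk ([] : List (String × String))).get? x = none := rfl

theorem pvBFold_getD (xs : List String) (d : PySem.Dict String (List String)) (c : String) :
    (pvBFold xs d).getD c [] = d.getD c [] ++ xs.filter (fun a => pvModuleOf.get? a == some c) := by
  induction xs generalizing d with
  | nil => simp [pvBFold]
  | cons a rest ih =>
    cases h : pvModuleOf.get? a with
    | none =>
      have hstep : pvBFold (a :: rest) d = pvBFold rest d := by
        simp only [pvBFold, List.foldl_cons, h]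
      rw [hstep, ih, List.filter_cons]
      simp [h]
    | some m =>
      have hstep : pvBFold (a :: rest) d = pvBFold rest (d.modify m [] (· ++ [a])) := by
        simp only [pvBFold, List.foldl_cons, h]
      rw [hstep, ih, PySem.Dict.getD_modify, List.filter_cons]
      by_cases hcm : c = m
      · subst hcm; simp [h]
      · simp [h, hcm, Ne.symm hcm]

theorem moduleOf_typing (a : String) :
    (pvModuleOf.get? a == some "typing") =
      decide (a ∈ (["Dict", "List", "Optional", "Union", "Any", "Tuple"] : List String)) := by
  simp only [pvModuleOf, PySem.Dict.get?_mk_cons, pvGet?_mk_nil]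
  split_ifs with h1 h2 h3 h4 h5 h6 h7 h8 h9 h10 <;> simp only [beq_iff_eq] at * <;>
    try (subst_vars; decide)
  exact (decide_eq_false (by
    intro hmem
    simp only [List.mem_cons, List.not_mem_nil, or_false] at hmem
    rcases hmem with rfl | rfl | rfl | rfl | rfl | rfl <;> simp_all)).symm

theorem moduleOf_fastapi (a : String) :
    (pvModuleOf.get? a == some "fastapi") =
      decide (a ∈ (["Request", "Response", "HTTPException"] : List String)) := by
  simp only [pvModuleOf, PySem.Dict.get?_mk_cons, pvGet?_mk_nil]
  split_ifs with h1 h2 h3 h4 h5 h6 h7 h8 h9 h10 <;> simp only [beq_iff_eq] at * <;>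
    try (subst_vars; decide)
  exact (decide_eq_false (by
    intro hmem
    simp only [List.mem_cons, List.not_mem_nil, or_false] at hmem
    rcases hmem with rfl | rfl | rfl <;> simp_all)).symm

theorem moduleOf_sqla (a : String) :
    (pvModuleOf.get? a == some "sqlalchemy.ext.asyncio") = (a == "AsyncSession") := by
  simp only [pvModuleOf, PySem.Dict.get?_mk_cons, pvGet?_mk_nil]
  split_ifs with h1 h2 h3 h4 h5 h6 h7 h8 h9 h10 <;> simp only [beq_iff_eq] at * <;>
    try (subst_vars; decide)
  have hx : (a == "AsyncSession") = false := beq_eq_false_iff_ne.2 (fun h => h10 h.symm)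
  rw [hx]
  decide

theorem filter_beq_of_nodup (xs : List String) (v : String) (h : xs.Nodup) :
    xs.filter (fun a => a == v) = if v ∈ xs then [v] else [] := by
  induction xs with
  | nil => simp
  | cons a rest ih =>
    simp only [List.nodup_cons] at h
    rw [List.filter_cons]
    by_cases hav : a = v
    · subst hav
      simp [h.1, ih h.2]
    · simp [hav, Ne.symm hav, ih h.2]

-- ===== VERDICT (by name: the statement is the Claim_ definition above) =====
theorem generate_import_statements_spec : Claim_equal_generate_import_statements := by
  intro xs _ hpre
  unfold Spec_generate_import_statements
  unfold generate_import_statements generate_import_statements_alt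
  simp only [PySem.List.foldl_append_ite_eq_filter, List.nil_append]
  rw [show (xs.foldl (fun d a => match pvModuleOf.get? a with
      | some m => d.modify m [] (· ++ [a])
      | none => d) PySem.Dict.empty) = pvBFold xs PySem.Dict.empty from rfl]
  simp only [pvModuleOrder, List.foldl_cons, List.foldl_nil]
  rw [pvBFold_getD, pvBFold_getD, pvBFold_getD]
  simp only [PySem.Dict.getD_empty, List.nil_append]
  rw [List.filter_congr (fun a _ => moduleOf_typing a),
      List.filter_congr (fun a _ => moduleOf_fastapi a),
      List.filter_congr (fun a _ => moduleOf_sqla a)]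
  rw [filter_beq_of_nodup xs "AsyncSession" hpre]
  by_cases hs : "AsyncSession" ∈ xs <;>
    simp only [hs, if_true, if_false] <;>
    split_ifs <;> simp_all <;> decide
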